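-- pv_equiv track=rewrite | github.com/mvp-krayu/krayu-program-intelligence | scripts/pios/projection_runtime.py | _parse_traceability
-- ===== SOURCE A (Python) =====
-- from typing import Any, Dict, List, Optional, Tuple
--
-- def _parse_traceability(traceability_text: str) -> Tuple[str, str]:
--     """Return (status, caveats_raw) from Traceability section text."""
--     status = ""
--     caveats_raw = ""
--     for line in traceability_text.splitlines():
--         stripped = line.strip()
--         if stripped.startswith("- Status:"):
--             status = stripped.split("- Status:", 1)[1].strip()
--         elif stripped.startswith("- Caveats:"):
--             caveats_raw = stripped.split("- Caveats:", 1)[1].strip()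
--     return status, caveats_raw
-- ===== SOURCE B (Python) =====
-- def _parse_traceability(traceability_text):
--     """Return (status, caveats_raw) from Traceability section text."""
--     status = None
--     caveats = None
--     for line in reversed(traceability_text.splitlines()):
--         s = line.strip()
--         if status is None and s.startswith("- Status:"):
--             status = s.split("- Status:", 1)[1].strip()
--         if caveats is None and s.startswith("- Caveats:"):
--             caveats = s.split("- Caveats:", 1)[1].strip()
--         if status is not None and caveats is not None:
--             break
--     return (status if status is not None else "",
--             caveats if caveats is not None else "")
-- ===== Notes on version B (the rewrite author's own statement) =====
-- stated objective: alternative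
-- what changed: B scans the lines in reverse, keeping only the first hit for each field (= A's last forward hit) and breaking out as soon as both are found, instead of A's full forward pass that overwrites on every hit.
import Mathlib
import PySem

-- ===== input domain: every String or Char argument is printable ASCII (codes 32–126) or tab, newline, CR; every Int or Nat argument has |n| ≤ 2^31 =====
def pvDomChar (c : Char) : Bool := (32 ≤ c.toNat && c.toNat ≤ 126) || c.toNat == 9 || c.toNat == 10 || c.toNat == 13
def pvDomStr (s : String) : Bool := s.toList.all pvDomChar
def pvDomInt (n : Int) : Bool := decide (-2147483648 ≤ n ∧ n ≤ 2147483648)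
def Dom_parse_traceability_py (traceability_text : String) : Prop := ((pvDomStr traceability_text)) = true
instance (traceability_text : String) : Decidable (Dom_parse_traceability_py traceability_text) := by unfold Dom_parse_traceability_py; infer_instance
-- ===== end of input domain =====

-- B re-reads the lines back to front with per-field first-hit capture and early exit; same return value, alternative decomposition (no speed claim).

-- ===== PORT A =====
-- stripped.split(sep, 1)[1].strip(); the [1] index is only reached when `stripped` starts
-- with `sep`, so the split always has two pieces and the List.getD default is unreachable.
def pvAfterA (s sep : String) : String :=
  PySem.Str.strip (((PySem.Str.splitMax? s sep 1).getD []).getD 1 "")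

def parse_traceability_py (traceability_text : String) : String × String :=
  (PySem.Str.splitlines traceability_text).foldl
    (fun (acc : String × String) line =>
      let stripped := PySem.Str.strip line
      if PySem.Str.startswith stripped "- Status:" then
        (pvAfterA stripped "- Status:", acc.2)
      else if PySem.Str.startswith stripped "- Caveats:" then
        (acc.1, pvAfterA stripped "- Caveats:")
      else acc)
    ("", "")

-- ===== PORT B =====
-- s.split(sep, 1)[1].strip(), reached only when s starts with sep (see pvAfterA's note).
def pvAfterB (s sep : String) : String :=
  PySem.Str.strip (((PySem.Str.splitMax? s sep 1).getD []).getD 1 "")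

-- the reverse loop of Source B: two Option accumulators, break once both are set
def pvAltLoop : List String → Option String → Option String → Option String × Option String
  | [], st, cv => (st, cv)
  | line :: rest, st, cv =>
    let s := PySem.Str.strip line
    let st' := if st.isNone && PySem.Str.startswith s "- Status:" then
        some (pvAfterB s "- Status:") else st
    let cv' := if cv.isNone && PySem.Str.startswith s "- Caveats:" then
        some (pvAfterB s "- Caveats:") else cv
    if st'.isSome && cv'.isSome then (st', cv') else pvAltLoop rest st' cv'

def parse_traceability_py_alt (traceability_text : String) : String × String :=
  let r := pvAltLoop (PySem.Str.splitlines traceability_text).reverse none none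
  (r.1.getD "", r.2.getD "")

-- ===== PRECONDITION & SPEC =====
def Spec_parse_traceability_py (traceability_text : String) (out : String × String) : Prop := out = parse_traceability_py_alt traceability_text
instance (traceability_text : String) (out : String × String) : Decidable (Spec_parse_traceability_py traceability_text out) := by unfold Spec_parse_traceability_py; infer_instance

-- ===== CLAIM (what is proved, stated in full; the proofs are below) =====
def Claim_equal_parse_traceability_py : Prop := ∀ (traceability_text : String), Dom_parse_traceability_py traceability_text → Spec_parse_traceability_py traceability_text (parse_traceability_py traceability_text)

-- ===== LEMMAS AND PROOFS =====

def pvStat (l : String) : Bool := PySem.Str.startswith (PySem.Str.strip l) "- Status:"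
def pvCav (l : String) : Bool := PySem.Str.startswith (PySem.Str.strip l) "- Caveats:"

def pvFS (ls : List String) : Option String :=
  (ls.find? pvStat).map (fun l => pvAfterA (PySem.Str.strip l) "- Status:")
def pvFC (ls : List String) : Option String :=
  (ls.find? pvCav).map (fun l => pvAfterA (PySem.Str.strip l) "- Caveats:")

-- a line cannot start with both markers
lemma pv_excl (l : String) (h : pvStat l = true) : pvCav l = false := by
  unfold pvStat at h
  unfold pvCav
  rw [PySem.Str.startswith_eq] at h ⊢
  by_contra hc
  simp only [Bool.not_eq_false] at hc
  rw [PySem.Chars.startswith_iff] at h hc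
  have h9 : ("- Status:".toList) = (PySem.Str.strip l).toList.take ("- Status:".toList.length) :=
    List.prefix_iff_eq_take.mp h
  have h10 : ("- Caveats:".toList) = (PySem.Str.strip l).toList.take ("- Caveats:".toList.length) :=
    List.prefix_iff_eq_take.mp hc
  simp only [show "- Status:".toList.length = 9 from rfl,
    show "- Caveats:".toList.length = 10 from rfl] at h9 h10
  have : ("- Status:".toList) = ("- Caveats:".toList).take 9 := by
    rw [h9, h10, List.take_take]
    norm_num
  simp at this

lemma pvFoldA (ls : List String) :
    ls.foldl
      (fun (acc : String × String) line =>
        let stripped := PySem.Str.strip line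
        if PySem.Str.startswith stripped "- Status:" then
          (pvAfterA stripped "- Status:", acc.2)
        else if PySem.Str.startswith stripped "- Caveats:" then
          (acc.1, pvAfterA stripped "- Caveats:")
        else acc)
      ("", "") = ((pvFS ls.reverse).getD "", (pvFC ls.reverse).getD "") := by
  induction ls using List.reverseRecOn with
  | nil => simp [pvFS, pvFC]
  | append_singleton xs x ih =>
    rw [List.foldl_append, ih]
    simp only [List.foldl_cons, List.foldl_nil, List.reverse_append,
      List.reverse_singleton, List.singleton_append]
    by_cases hs : pvStat x
    · have hc := pv_excl x hs
      simp [pvStat] at hs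
      simp [pvCav] at hc
      simp [pvFS, pvFC, pvStat, pvCav, hs, hc]
    · by_cases hc : pvCav x
      · simp [pvStat] at hs
        simp [pvCav] at hc
        simp [pvFS, pvFC, pvStat, pvCav, hs, hc]
      · simp [pvStat] at hs
        simp [pvCav] at hc
        simp [pvFS, pvFC, pvStat, pvCav, hs, hc]

lemma pvLoopB (r : List String) : ∀ st cv : Option String,
    pvAltLoop r st cv = (st.or (pvFS r), cv.or (pvFC r)) := by
  induction r with
  | nil => intro st cv; simp [pvAltLoop, pvFS, pvFC]
  | cons l rest ih =>
    intro st cv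
    rw [pvAltLoop]
    by_cases hs : pvStat l
    · have hc := pv_excl l hs
      simp [pvStat] at hs
      simp [pvCav] at hc
      have hst' : (if st.isNone && PySem.Str.startswith (PySem.Str.strip l) "- Status:"
          then some (pvAfterB (PySem.Str.strip l) "- Status:") else st)
          = st.or (some (pvAfterA (PySem.Str.strip l) "- Status:")) := by
        cases st <;> simp [hs, pvAfterA, pvAfterB]
      have hcv' : (if cv.isNone && PySem.Str.startswith (PySem.Str.strip l) "- Caveats:"
          then some (pvAfterB (PySem.Str.strip l) "- Caveats:") else cv) = cv := by
        cases cv <;> simp [hc]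
      have hFS : pvFS (l :: rest) = some (pvAfterA (PySem.Str.strip l) "- Status:") := by
        simp [pvFS, List.find?_cons, pvStat, hs]
      have hFC : pvFC (l :: rest) = pvFC rest := by
        simp [pvFC, List.find?_cons, pvCav, hc]
      rw [hst', hcv', hFS, hFC]
      split
      · next hboth =>
        cases cv with
        | none => simp at hboth
        | some b => simp [Option.or]
      · rw [ih]
        cases st <;> simp [Option.or_assoc, Option.or]
    · by_cases hc : pvCav l
      · simp [pvStat] at hs
        simp [pvCav] at hc
        have hst' : (if st.isNone && PySem.Str.startswith (PySem.Str.strip l) "- Status:"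
            then some (pvAfterB (PySem.Str.strip l) "- Status:") else st) = st := by
          cases st <;> simp [hs]
        have hcv' : (if cv.isNone && PySem.Str.startswith (PySem.Str.strip l) "- Caveats:"
            then some (pvAfterB (PySem.Str.strip l) "- Caveats:") else cv)
            = cv.or (some (pvAfterA (PySem.Str.strip l) "- Caveats:")) := by
          cases cv <;> simp [hc, pvAfterA, pvAfterB]
        rw [hst', hcv']
        have hFS : pvFS (l :: rest) = pvFS rest := by
          simp [pvFS, List.find?_cons, pvStat, hs]
        have hFC : pvFC (l :: rest) = some (pvAfterA (PySem.Str.strip l) "- Caveats:") := by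
          simp [pvFC, List.find?_cons, pvCav, hc]
        rw [hFS, hFC]
        split
        · next hboth =>
          cases st with
          | none => simp at hboth
          | some a => simp [Option.or]
        · rw [ih]
          cases cv <;> simp [Option.or_assoc, Option.or]
      · simp [pvStat] at hs
        simp [pvCav] at hc
        have hst' : (if st.isNone && PySem.Str.startswith (PySem.Str.strip l) "- Status:"
            then some (pvAfterB (PySem.Str.strip l) "- Status:") else st) = st := by
          cases st <;> simp [hs]
        have hcv' : (if cv.isNone && PySem.Str.startswith (PySem.Str.strip l) "- Caveats:"
            then some (pvAfterB (PySem.Str.strip l) "- Caveats:") else cv) = cv := by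
          cases cv <;> simp [hc]
        rw [hst', hcv']
        have hFS : pvFS (l :: rest) = pvFS rest := by
          simp [pvFS, List.find?_cons, pvStat, hs]
        have hFC : pvFC (l :: rest) = pvFC rest := by
          simp [pvFC, List.find?_cons, pvCav, hc]
        rw [hFS, hFC]
        split
        · next hboth =>
          cases st with
          | none => simp at hboth
          | some a =>
            cases cv with
            | none => simp at hboth
            | some b => simp [Option.or]
        · exact ih st cv

-- ===== VERDICT (by name: the statement is the Claim_ definition above) =====
theorem parse_traceability_py_spec : Claim_equal_parse_traceability_py := by
  intro t _
  unfold Spec_parse_traceability_py parse_traceability_py parse_traceability_py_alt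
  rw [pvFoldA, pvLoopB]
  simp [Option.or]
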